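-- pv_equiv track=rewrite | github.com/saxd0ct0r/Python | mega-scale-list/list-grok.py | generate_weight_vector
-- ===== SOURCE A (Python) =====
-- def generate_weight_vector(midis):
--   if not midis:
--     return []
--   midis = sorted(midis)
--   max_m = midis[-1]
--   min_m = midis[0]
--   span = max_m - min_m + 1
--   vector = []
--   for r in range(1, span + 1):
--     w_min = max_m - r + 1
--     count = sum(w_min <= m <= max_m for m in midis)
--     vector = [count] + vector  # Prepend for larger r left
--   return vector
-- ===== SOURCE B (Python) =====
-- def generate_weight_vector(midis):
--   if not midis:
--     return []
--   freq = {}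
--   for m in midis:
--     freq[m] = freq.get(m, 0) + 1
--   vector = []
--   running = 0
--   for t in range(max(midis), min(midis) - 1, -1):
--     running += freq.get(t, 0)
--     vector.append(running)
--   vector.reverse()
--   return vector
-- ===== Notes on version B (the rewrite author's own statement) =====
-- stated objective: faster
-- what changed: Instead of rescanning the whole list for every threshold, B builds a frequency dictionary in one pass and produces each count as a running suffix sum over the value range.
import Mathlib
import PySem

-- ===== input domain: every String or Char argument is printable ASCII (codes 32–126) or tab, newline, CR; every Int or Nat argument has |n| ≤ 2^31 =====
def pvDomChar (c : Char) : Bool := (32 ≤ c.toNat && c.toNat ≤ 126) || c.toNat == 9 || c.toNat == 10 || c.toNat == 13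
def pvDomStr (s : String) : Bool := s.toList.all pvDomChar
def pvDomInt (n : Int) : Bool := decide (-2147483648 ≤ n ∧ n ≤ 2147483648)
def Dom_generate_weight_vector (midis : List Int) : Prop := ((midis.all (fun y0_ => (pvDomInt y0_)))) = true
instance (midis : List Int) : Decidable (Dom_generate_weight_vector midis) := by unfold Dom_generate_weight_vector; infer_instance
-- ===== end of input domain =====

-- ===== PORT A =====
-- Literal port of A: sort, then for r = 1..span rescan the sorted list counting
-- w_min ≤ m ≤ max_m and prepend the count.
def generate_weight_vector (midis : List Int) : List Int :=
  if midis = [] then []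
  else
    let s := PySem.List.sorted midis (fun x => x) false
    let max_m := PySem.List.pyGetD s (-1) 0
    let min_m := PySem.List.pyGetD s 0 0
    let span := max_m - min_m + 1
    (PySem.List.pyRange 1 (span + 1) 1).foldl
      (fun vector r =>
        let w_min := max_m - r + 1
        let count := (s.map (fun m => if w_min ≤ m ∧ m ≤ max_m then (1 : Int) else 0)).sum
        count :: vector) []

-- ===== PORT B =====
-- Port of B: one counting pass into a dict, then a running suffix sum for
-- t = max..min (descending), appended and finally reversed.
def generate_weight_vector_alt (midis : List Int) : List Int :=
  if midis = [] then []
  else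
    let freq := midis.foldl (fun d m => d.insert m (d.getD m 0 + 1)) PySem.Dict.empty
    let hi := (PySem.List.max? midis (fun x => x)).getD 0
    let lo := (PySem.List.min? midis (fun x => x)).getD 0
    let res := (PySem.List.pyRange hi (lo - 1) (-1)).foldl
      (fun (st : Int × List Int) t =>
        let running := st.1 + freq.getD t 0
        (running, st.2 ++ [running])) (0, [])
    res.2.reverse

-- ===== PRECONDITION & SPEC =====
def Spec_generate_weight_vector (midis : List Int) (out : List Int) : Prop := out = generate_weight_vector_alt midis
instance (midis : List Int) (out : List Int) : Decidable (Spec_generate_weight_vector midis out) := by unfold Spec_generate_weight_vector; infer_instance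

-- ===== CLAIM (what is proved, stated in full; the proofs are below) =====
def Claim_equal_generate_weight_vector : Prop := ∀ (midis : List Int), Dom_generate_weight_vector midis → Spec_generate_weight_vector midis (generate_weight_vector midis)

-- ===== LEMMAS AND PROOFS =====

-- the common value both ports compute for a threshold t: #{m in midis | t <= m <= hi}
def gwvCnt (midis : List Int) (hi t : Int) : Int :=
  (midis.map (fun m => if t ≤ m ∧ m ≤ hi then (1 : Int) else 0)).sum

-- A's prepend-loop in closed form

theorem gwv_foldA (f : Int → Int) (hi : Int) :
    ∀ (n : Nat) (init : List Int),
      (PySem.List.pyRange 1 ((n : Int) + 1) 1).foldl (fun v r => f r :: v) init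
        = (PySem.List.pyRange (hi - n + 1) (hi + 1) 1).map (fun t => f (hi - t + 1)) ++ init := by
  intro n
  induction n with
  | zero =>
    intro init
    simp [PySem.List.pyRange_one_eq_nil]
  | succ k ih =>
    intro init
    have h1 : PySem.List.pyRange 1 ((k + 1 : Nat) + 1 : Int) 1
        = PySem.List.pyRange 1 ((k : Int) + 1) 1 ++ [(k : Int) + 1] := by
      have := PySem.List.pyRange_one_succ_right (a := 1) (b := (k : Int) + 1) (by omega)
      rw [← this]; norm_num
    have h2 : PySem.List.pyRange (hi - (k + 1 : Nat) + 1) (hi + 1) 1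
        = (hi - (k + 1 : Nat) + 1) :: PySem.List.pyRange (hi - (k : Nat) + 1) (hi + 1) 1 := by
      have := PySem.List.pyRange_one_cons (a := hi - (k + 1 : Nat) + 1) (b := hi + 1) (by push_cast; omega)
      rw [this]; congr 1; push_cast; ring_nf
    rw [h1, List.foldl_append, ih]
    rw [h2]
    simp only [List.map_cons, List.foldl_cons, List.foldl_nil, List.cons_append]
    congr 2
    push_cast; ring

-- B's descending running-sum loop in closed form

theorem gwv_foldB (c : Int → Int) :
    ∀ (n : Nat) (a b : Int), (a - b).toNat = n → ∀ (r0 : Int) (acc0 : List Int),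
      (PySem.List.pyRange a b (-1)).foldl
          (fun (st : Int × List Int) t =>
            (st.1 + c t, st.2 ++ [st.1 + c t])) (r0, acc0)
        = (r0 + ((PySem.List.pyRange a b (-1)).map c).sum,
           acc0 ++ (PySem.List.pyRange a b (-1)).map
             (fun t => r0 + ((PySem.List.pyRange a (t - 1) (-1)).map c).sum)) := by
  intro n
  induction n with
  | zero =>
    intro a b hn r0 acc0
    have hab : a ≤ b := by omega
    simp [PySem.List.pyRange_neg_one_eq_nil hab]
  | succ k ih =>
    intro a b hn r0 acc0
    have hba : b < a := by omega
    rw [PySem.List.pyRange_neg_one_cons hba]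
    simp only [List.foldl_cons, List.map_cons, List.sum_cons]
    rw [ih (a - 1) b (by omega)]
    have hhead : PySem.List.pyRange a (a - 1) (-1) = [a] := by
      rw [PySem.List.pyRange_neg_one_cons (by omega)]
      rw [PySem.List.pyRange_neg_one_eq_nil (by omega)]
    refine Prod.ext ?_ ?_
    · simp only; ring
    · simp only [hhead, List.map_cons, List.map_nil, List.sum_cons, List.sum_nil]
      rw [List.append_assoc]
      congr 1
      rw [List.singleton_append]
      congr 1
      · ring
      · apply List.map_congr_left
        intro t ht
        have htb : b < t ∧ t ≤ a - 1 := (PySem.List.mem_pyRange_neg_one.mp ht)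
        rw [PySem.List.pyRange_neg_one_cons (a := a) (b := t - 1) (by omega)]
        simp only [List.map_cons, List.sum_cons]
        ring

-- indicator sum over an integer range

theorem gwv_indicator (m : Int) :
    ∀ (n : Nat) (t : Int),
      ((PySem.List.pyRange t (t + n) 1).map (fun u => if m = u then (1 : Int) else 0)).sum
        = if t ≤ m ∧ m < t + n then 1 else 0 := by
  intro n
  induction n with
  | zero =>
    intro t
    rw [PySem.List.pyRange_one_eq_nil (by omega)]
    simp only [List.map_nil, List.sum_nil]
    split_ifs with h
    · omega
    · rfl
  | succ k ih =>
    intro t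
    rw [PySem.List.pyRange_one_cons (by push_cast; omega)]
    simp only [List.map_cons, List.sum_cons]
    have : t + 1 + (k : Int) = t + ((k + 1 : Nat) : Int) := by push_cast; ring
    rw [← this] at *
    have ihr := ih (t + 1)
    rw [show (t + 1 + (k:Int)) = t + 1 + (k:Int) from rfl] at ihr
    rw [ihr]
    split_ifs <;> omega

theorem gwv_cnt_eq_sum (midis : List Int) (hi t : Int)
    (hle : ∀ m ∈ midis, m ≤ hi) (ht : t ≤ hi + 1) :
    gwvCnt midis hi t
      = ((PySem.List.pyRange t (hi + 1) 1).map (fun u => ((midis.count u : Nat) : Int))).sum := by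
  induction midis with
  | nil =>
    simp [gwvCnt, List.count_nil]
  | cons m ms ihm =>
    have hms : ∀ x ∈ ms, x ≤ hi := fun x hx => hle x (List.mem_cons_of_mem _ hx)
    have hm : m ≤ hi := hle m (List.mem_cons_self)
    simp only [gwvCnt, List.map_cons, List.sum_cons]
    rw [show (List.map (fun m => if t ≤ m ∧ m ≤ hi then (1:Int) else 0) ms).sum = gwvCnt ms hi t from rfl, ihm hms]
    have hcount : ∀ u : Int, (((m :: ms).count u : Nat) : Int)
        = ((ms.count u : Nat) : Int) + (if u = m then 1 else 0) := by
      intro u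
      rw [List.count_cons]
      by_cases h : u = m
      · subst h; simp
      · have hb : (m == u) = false := by simp [Ne.symm h]
        simp [hb, h]
    have hmapeq : (PySem.List.pyRange t (hi + 1) 1).map (fun u => (((m :: ms).count u : Nat) : Int))
        = (PySem.List.pyRange t (hi + 1) 1).map
            (fun u => ((ms.count u : Nat) : Int) + (if u = m then 1 else 0)) := by
      apply List.map_congr_left; intro u _; exact hcount u
    rw [hmapeq, PySem.List.sum_map_add_int]
    have hn : hi + 1 = t + ((hi + 1 - t).toNat : Int) := by omega
    have hind := gwv_indicator m ((hi + 1 - t).toNat) t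
    have : ((PySem.List.pyRange t (hi + 1) 1).map (fun u => if u = m then (1:Int) else 0)).sum
        = if t ≤ m ∧ m ≤ hi then 1 else 0 := by
      rw [hn]
      have : (fun u => if u = m then (1:Int) else 0) = (fun u => if m = u then (1:Int) else 0) := by
        funext u
        by_cases h : u = m
        · subst h; simp
        · simp [h, Ne.symm h]
      rw [this, hind]
      split_ifs <;> omega
    rw [this]
    ring

-- the two ports agree on every input
theorem gwv_main (midis : List Int) :
    generate_weight_vector midis = generate_weight_vector_alt midis := by
  by_cases hne : midis = []
  · simp [generate_weight_vector, generate_weight_vector_alt, hne]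
  have hperm : (PySem.List.sorted midis (fun x => x) false).Perm midis :=
    PySem.List.sorted_perm midis (fun x => x) false
  set s := PySem.List.sorted midis (fun x => x) false with hs
  have hsne : s ≠ [] := by
    intro h
    exact hne (List.Perm.eq_nil (h ▸ hperm).symm)
  obtain ⟨x, tl, hx⟩ : ∃ x tl, s = x :: tl := by
    cases hcs : s with
    | nil => exact absurd hcs hsne
    | cons a b => exact ⟨a, b, rfl⟩
  obtain ⟨hv, hhv⟩ : ∃ v, PySem.List.max? midis (fun x => x) = some v := by
    cases hm : PySem.List.max? midis (fun x => x) with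
    | none => exact absurd ((PySem.List.max?_eq_none_iff midis (fun x => x)).mp hm) hne
    | some v => exact ⟨v, rfl⟩
  obtain ⟨lv, hlv⟩ : ∃ v, PySem.List.min? midis (fun x => x) = some v := by
    cases hm : PySem.List.min? midis (fun x => x) with
    | none => exact absurd ((PySem.List.min?_eq_none_iff midis (fun x => x)).mp hm) hne
    | some v => exact ⟨v, rfl⟩
  have hv_mem : hv ∈ midis := PySem.List.max?_mem hhv
  have hv_max : ∀ y ∈ midis, y ≤ hv := PySem.List.max?_isMax hhv
  have lv_mem : lv ∈ midis := PySem.List.min?_mem hlv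
  have lv_min : ∀ y ∈ midis, lv ≤ y := PySem.List.min?_isMin hlv
  set HI : Int := s.getLast hsne with hHI
  set LO : Int := x with hLO
  have hlast_mem : HI ∈ midis := hperm.mem_iff.mp (List.getLast_mem hsne)
  have hhead_mem : LO ∈ midis := hperm.mem_iff.mp (hx ▸ List.mem_cons_self)
  have hlen : s.length = midis.length := hperm.length_eq
  have hlast_max : ∀ y ∈ midis, y ≤ HI := by
    intro y hy
    obtain ⟨i, hi, rfl⟩ := List.mem_iff_getElem.mp (hperm.mem_iff.mpr hy)
    rw [hHI, List.getLast_eq_getElem]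
    have hmono := PySem.List.sorted_id_getElem_mono (xs := midis) (p := i) (q := s.length - 1)
      (by omega) (by rw [← hs]; omega)
    simpa [← hs] using hmono
  have hhead_min : ∀ y ∈ midis, LO ≤ y := by
    intro y hy
    have h := PySem.List.key_head_sorted_le (xs := midis) (key := fun z => z) (m := LO) (t := tl)
      (by rw [← hs]; exact hx)
    exact h y hy
  have hv_eq : hv = HI := le_antisymm (hlast_max hv hv_mem) (hv_max _ hlast_mem)
  have lv_eq : lv = LO := le_antisymm (lv_min LO hhead_mem) (hhead_min lv lv_mem)
  have hlohi : LO ≤ HI := hlast_max LO hhead_mem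
  have hmax_eq : PySem.List.pyGetD s (-1) 0 = HI := by
    rw [hHI]; exact PySem.List.pyGetD_neg_one s 0 hsne
  have hmin_eq : PySem.List.pyGetD s 0 0 = LO := by
    rw [hx, hLO]; exact PySem.List.pyGetD_zero_cons x tl 0
  have hfreq : ∀ u : Int,
      (midis.foldl (fun d m => d.insert m (d.getD m 0 + 1)) PySem.Dict.empty).getD u 0
        = ((midis.count u : Nat) : Int) := by
    intro u
    rw [PySem.Dict.getD_foldl_insert_add_one]
    simp [PySem.Dict.getD_empty]
  -- unfold both sides
  rw [generate_weight_vector, generate_weight_vector_alt, if_neg hne, if_neg hne]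
  simp only [← hs, hmax_eq, hmin_eq, hhv, hlv, Option.getD_some, hv_eq, lv_eq]
  -- A side: closed form
  set n : Nat := (HI - LO + 1).toNat with hn
  have hspan : HI - LO + 1 = (n : Int) := by omega
  rw [hspan,
    gwv_foldA (fun r => (s.map (fun m => if HI - r + 1 ≤ m ∧ m ≤ HI then (1 : Int) else 0)).sum) HI n []]
  have hlon : HI - (n : Int) + 1 = LO := by omega
  rw [hlon, List.append_nil]
  -- B side: closed form
  rw [gwv_foldB (fun t => (midis.foldl (fun d m => d.insert m (d.getD m 0 + 1)) PySem.Dict.empty).getD t 0)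
      ((HI - (LO - 1)).toNat) HI (LO - 1) rfl 0 []]
  simp only [List.nil_append]
  rw [show PySem.List.pyRange HI (LO - 1) (-1) = (PySem.List.pyRange ((LO - 1) + 1) (HI + 1) 1).reverse from
       PySem.List.pyRange_neg_one_eq_reverse HI (LO - 1), show (LO - 1) + 1 = LO from by ring]
  rw [List.map_reverse, List.reverse_reverse]
  apply List.map_congr_left
  intro t ht
  have htb : LO ≤ t ∧ t < HI + 1 := PySem.List.mem_pyRange_one.mp ht
  have e1 : HI - (HI - t + 1) + 1 = t := by ring
  rw [e1]
  have hsum : (s.map (fun m => if t ≤ m ∧ m ≤ HI then (1 : Int) else 0)).sum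
      = gwvCnt midis HI t := (hperm.map _).sum_eq
  rw [hsum, gwv_cnt_eq_sum midis HI t (fun m hm => hlast_max m hm) (by omega)]
  rw [show PySem.List.pyRange HI (t - 1) (-1) = (PySem.List.pyRange ((t - 1) + 1) (HI + 1) 1).reverse from
       PySem.List.pyRange_neg_one_eq_reverse HI (t - 1), show (t - 1) + 1 = t from by ring]
  rw [List.map_reverse, List.sum_reverse]
  rw [List.map_congr_left
    (fun u _ => hfreq u :
      ∀ u ∈ PySem.List.pyRange t (HI + 1) 1,
        (midis.foldl (fun d m => d.insert m (d.getD m 0 + 1)) PySem.Dict.empty).getD u 0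
          = ((midis.count u : Nat) : Int))]
  ring

-- ===== VERDICT (by name: the statement is the Claim_ definition above) =====
theorem generate_weight_vector_spec : Claim_equal_generate_weight_vector := by
  intro midis _
  unfold Spec_generate_weight_vector
  exact gwv_main midis
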